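-- pv_equiv track=rewrite | github.com/varnerlab/Reduced_EMT_Model | Results/reformat_prediction_patch.py | julia_listlist_to_array
-- ===== SOURCE A (Python) =====
-- def julia_listlist_to_array(dat):
--     dat_new = [[],[],[],[],[],[],[],[],[],[],[]] # number of objectives (x2space)
--     counter = 0
--     for LINE in dat:
--         if LINE.count('[') == 1:
--             counter = 0
--         dat_new[counter].append(LINE.replace('[','').replace(']',''))
--         counter = counter + 1
--     outlines = []
--     for LIST in dat_new:
--         outlines.append('\t'.join(LIST))
--     return outlines
-- ===== SOURCE B (Python) =====
-- def julia_listlist_to_array(dat):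
--     # group-then-transpose: segment dat into records at lines whose '[' count is 1,
--     # then scatter each record's stripped lines into 11 positional columns
--     records = []
--     for line in dat:
--         if line.count('[') == 1 or not records:
--             records.append([])
--         records[-1].append(line.replace('[', '').replace(']', ''))
--     cols = [[] for _ in range(11)]
--     for rec in records:
--         for j, s in enumerate(rec):
--             cols[j].append(s)
--     return ['\t'.join(c) for c in cols]
-- ===== Notes on version B (the rewrite author's own statement) =====
-- stated objective: alternative
-- what changed: Replaces the single resetting-counter pass that appends into 11 column lists with a group-then-transpose decomposition: lines are first segmented into records (a new record starts at each line containing exactly one '['), then each record's stripped lines are scattered by position into the 11 columns, which are finally tab-joined.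
import Mathlib
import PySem

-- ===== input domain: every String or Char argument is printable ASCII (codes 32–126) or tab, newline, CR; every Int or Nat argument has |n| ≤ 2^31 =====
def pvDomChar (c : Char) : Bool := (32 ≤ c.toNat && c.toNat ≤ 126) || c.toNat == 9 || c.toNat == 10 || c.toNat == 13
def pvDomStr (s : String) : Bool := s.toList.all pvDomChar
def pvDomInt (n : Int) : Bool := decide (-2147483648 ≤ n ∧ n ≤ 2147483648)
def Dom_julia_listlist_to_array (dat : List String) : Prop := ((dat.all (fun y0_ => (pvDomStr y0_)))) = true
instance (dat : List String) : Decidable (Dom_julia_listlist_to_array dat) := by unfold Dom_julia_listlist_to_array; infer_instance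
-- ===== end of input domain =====

-- B replaces A's resetting-counter single pass with a group-then-transpose decomposition (objective: alternative, same cost).

-- ===== PORT A =====
def pvStrip (s : String) : String :=
  PySem.Str.replace (PySem.Str.replace s "[" "") "]" ""

def pvStepA (st : List (List String) × Nat) (LINE : String) : List (List String) × Nat :=
  let counter := if PySem.Str.count LINE "[" = 1 then 0 else st.2
  -- dat_new[counter].append(...): Python raises IndexError when counter ≥ 11 (excluded by Pre_);
  -- there List.modify is a no-op, nothing is claimed on such inputs
  (st.1.modify counter (fun L => L ++ [pvStrip LINE]), counter + 1)

def julia_listlist_to_array (dat : List String) : List String :=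
  let st := dat.foldl pvStepA ([[],[],[],[],[],[],[],[],[],[],[]], 0)
  st.1.foldl (fun outlines LIST => outlines ++ [PySem.Str.join "\t" LIST]) []

-- ===== PORT B =====
def pvStepR (recs : List (List String)) (line : String) : List (List String) :=
  if PySem.Str.count line "[" = 1 || recs.isEmpty then
    recs ++ [[pvStrip line]]
  else
    recs.dropLast ++ [recs.getLastD [] ++ [pvStrip line]]

def pvAddRec (cols : List (List String)) (rec : List String) : List (List String) :=
  rec.zipIdx.foldl (fun c p => c.modify p.2 (fun L => L ++ [p.1])) cols

def julia_listlist_to_array_alt (dat : List String) : List String :=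
  let records := dat.foldl pvStepR []
  let cols := records.foldl pvAddRec [[],[],[],[],[],[],[],[],[],[],[]]
  cols.map (PySem.Str.join "\t")

-- ===== PRECONDITION & SPEC =====
-- Pre_ excludes exactly the inputs on which A raises IndexError: some line sits 11 or more
-- positions after the last record start (a line with exactly one '['), i.e. a record longer
-- than the 11 columns.  (B raises there too.)
def Pre_julia_listlist_to_array (dat : List String) : Prop :=
  ∀ i, i < dat.length → 11 ≤ i →
    ∃ j, j < dat.length ∧ j ≤ i ∧ i ≤ j + 10 ∧ PySem.Str.count (dat.getD j "") "[" = 1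

instance (dat : List String) : Decidable (Pre_julia_listlist_to_array dat) := by
  unfold Pre_julia_listlist_to_array; infer_instance

def pvWitness_julia_listlist_to_array : List String := ["[1.0, 2.0", "3.0]", "[4.0]"]

def Spec_julia_listlist_to_array (dat : List String) (out : List String) : Prop := out = julia_listlist_to_array_alt dat
instance (dat : List String) (out : List String) : Decidable (Spec_julia_listlist_to_array dat out) := by unfold Spec_julia_listlist_to_array; infer_instance

-- ===== CLAIM (what is proved, stated in full; the proofs are below) =====
def Claim_equal_julia_listlist_to_array : Prop := ∀ (dat : List String), Dom_julia_listlist_to_array dat → Pre_julia_listlist_to_array dat → Spec_julia_listlist_to_array dat (julia_listlist_to_array dat)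

-- ===== LEMMAS AND PROOFS =====

theorem pvAddRec_concat (cols : List (List String)) (rec : List String) (s : String) :
    pvAddRec cols (rec ++ [s]) = (pvAddRec cols rec).modify rec.length (fun L => L ++ [s]) := by
  simp [pvAddRec, List.zipIdx_append, List.foldl_append]

theorem pvAddRec_single (cols : List (List String)) (s : String) :
    pvAddRec cols [s] = cols.modify 0 (fun L => L ++ [s]) := by
  simp [pvAddRec, List.zipIdx]

-- one step of A equals one step of B, seen through the transpose accumulator
theorem pvStep_eq (recs : List (List String)) (cols0 : List (List String)) (line : String) :
    pvStepA (recs.foldl pvAddRec cols0, (recs.getLastD []).length) line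
      = ((pvStepR recs line).foldl pvAddRec cols0, ((pvStepR recs line).getLastD []).length) := by
  by_cases h1 : PySem.Chars.count line.toList ['['] = 1
  · simp [pvStepA, pvStepR, h1, List.foldl_append, pvAddRec_single]
  · rcases eq_or_ne recs [] with h2 | h2
    · subst h2
      simp [pvStepA, pvStepR, h1, pvAddRec_single]
    · have hgl : recs.getLastD [] = recs.getLast h2 := by
        simp [List.getLastD_eq_getLast?, List.getLast?_eq_some_getLast h2]
      have hlast : recs.dropLast ++ [recs.getLast h2] = recs := List.dropLast_append_getLast h2
      simp only [pvStepA, pvStepR]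
      rw [if_neg (by simp [h1]), if_neg (by simp [h1, h2])]
      rw [Prod.mk.injEq]
      refine ⟨?_, ?_⟩
      · rw [List.foldl_append, List.foldl_cons, List.foldl_nil, pvAddRec_concat]
        conv_lhs => rw [← hlast, List.foldl_append]
        simp [List.getLast?_eq_some_getLast h2]
      · simp [List.getLast?_eq_some_getLast h2]

theorem pvFold_eq (dat : List String) (recs : List (List String)) (cols0 : List (List String)) :
    dat.foldl pvStepA (recs.foldl pvAddRec cols0, (recs.getLastD []).length)
      = ((dat.foldl pvStepR recs).foldl pvAddRec cols0,
         ((dat.foldl pvStepR recs).getLastD []).length) := by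
  induction dat generalizing recs with
  | nil => simp
  | cons line rest ih =>
      simp only [List.foldl_cons]
      rw [pvStep_eq recs cols0 line]
      exact ih (pvStepR recs line)

theorem pvFoldJoin (cols : List (List String)) (acc : List String) :
    cols.foldl (fun outlines LIST => outlines ++ [PySem.Str.join "\t" LIST]) acc
      = acc ++ cols.map (PySem.Str.join "\t") := by
  induction cols generalizing acc with
  | nil => simp
  | cons c cs ih => simp [ih]

theorem pvBothEq (dat : List String) :
    julia_listlist_to_array dat = julia_listlist_to_array_alt dat := by
  unfold julia_listlist_to_array julia_listlist_to_array_alt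
  have h := pvFold_eq dat [] [[],[],[],[],[],[],[],[],[],[],[]]
  simp only [List.foldl_nil, List.getLastD_nil, List.length_nil] at h
  rw [h, pvFoldJoin]
  simp

-- ===== VERDICT (by name: the statement is the Claim_ definition above) =====
theorem julia_listlist_to_array_spec : Claim_equal_julia_listlist_to_array := by
  intro dat _ _
  exact pvBothEq dat
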